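-- pv_equiv track=rewrite | github.com/khyunchoi/TIL | record_of_the_day/220819/test1.py | solution
-- ===== SOURCE A (Python) =====
-- import heapq
--
-- def solution(region, num, info):
--     answer = [-1 for _ in range(len(info))]
--     new_info = []
--     region_heap = []
--     another_heap = []
--     winner = 1
--     num = min(num, len(info))
--
--     for i in range(len(info)):
--         new_info.append([i, info[i][0], (info[i][1] + 1) * 2 + (info[i][2] + 2) + (info[i][3] + 1) * 5])
--
--     for i in range(len(new_info)):
--         if new_info[i][1] == region:
--             heapq.heappush(region_heap, (-new_info[i][2], new_info[i]))
--         else: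
--             heapq.heappush(another_heap, (-new_info[i][2], new_info[i]))
--
--     while winner <= num:
--         if region_heap:
--             infomation = heapq.heappop(region_heap)[1]
--             answer[infomation[0]] = winner
--         else:
--             infomation = heapq.heappop(another_heap)[1]
--             answer[infomation[0]] = winner
--         winner += 1
--
--     return answer
-- ===== SOURCE B (Python) =====
-- def solution(region, num, info):
--     scored = [(i, row[0], (row[1] + 1) * 2 + (row[2] + 2) + (row[3] + 1) * 5)
--               for i, row in enumerate(info)]
--     local = sorted([e for e in scored if e[1] == region], key=lambda e: (-e[2], e[0]))
--     others = sorted([e for e in scored if e[1] != region], key=lambda e: (-e[2], e[0]))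
--     answer = [-1] * len(info)
--     k = max(0, min(num, len(info)))
--     for rank, entry in enumerate((local + others)[:k], 1):
--         answer[entry[0]] = rank
--     return answer
-- ===== Notes on version B (the rewrite author's own statement) =====
-- stated objective: simpler
-- what changed: Replaced the index-loop building new_info, the two heapq heaps with negated-score tuple keys and the while-loop of heappops by a comprehension, a partition into two lists sorted once with key (-score, index), and a single enumerate loop assigning ranks over the truncated concatenation.
import Mathlib
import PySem

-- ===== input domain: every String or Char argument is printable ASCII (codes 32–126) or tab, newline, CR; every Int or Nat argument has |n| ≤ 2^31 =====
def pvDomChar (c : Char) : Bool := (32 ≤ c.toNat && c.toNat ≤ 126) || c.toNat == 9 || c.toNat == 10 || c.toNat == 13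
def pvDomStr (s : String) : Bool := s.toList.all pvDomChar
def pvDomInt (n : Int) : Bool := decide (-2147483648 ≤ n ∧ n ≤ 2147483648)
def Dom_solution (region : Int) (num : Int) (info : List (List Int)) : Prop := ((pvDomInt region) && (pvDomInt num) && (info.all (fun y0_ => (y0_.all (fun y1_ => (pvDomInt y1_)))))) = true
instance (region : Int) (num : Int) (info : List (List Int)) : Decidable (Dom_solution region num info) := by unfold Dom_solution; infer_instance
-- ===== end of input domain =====

-- B replaces A's two heapq heaps and its while-loop of heappops by partitioning the scored
-- entries, sorting each part once with key (-score, index), and assigning ranks in one pass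
-- over the truncated concatenation; objective: simpler.

-- ===== PORT A =====

-- entry built by A: [i, info[i][0], score]  ported as (i, member_region, score)
def pvEntry (p : Int × List Int) : Int × Int × Int :=
  (p.1, PySem.List.pyGetD p.2 0 0,
    (PySem.List.pyGetD p.2 1 0 + 1) * 2 + (PySem.List.pyGetD p.2 2 0 + 2)
      + (PySem.List.pyGetD p.2 3 0 + 1) * 5)

-- heapq model (exact here): the heap holds pairs (-score, [i, region, score]); every push
-- precedes every pop, and heappop returns the minimum under Python tuple/list comparison,
-- which — the indices i being pairwise distinct — is the order 'smaller first component,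
-- then smaller i'.  A list kept sorted by ordered insertion (heappush) with head removal
-- (heappop) realises exactly that pop sequence.
def pvHeapBefore (a b : Int × (Int × Int × Int)) : Bool :=
  decide (a.1 < b.1) || (a.1 == b.1 && decide (a.2.1 < b.2.1))

def pvHeapPush (h : List (Int × (Int × Int × Int))) (x : Int × (Int × Int × Int)) :
    List (Int × (Int × Int × Int)) :=
  PySem.List.insertBy pvHeapBefore x h

-- while winner <= num: pop from region_heap if nonempty else another_heap, record the rank.
-- The branch with both heaps empty is unreachable in A (num ≤ len(info) = number of pushed
-- items); the port returns the answer there only for totality.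
def pvAwardLoop (rh ah : List (Int × (Int × Int × Int))) (answer : List Int)
    (winner : Int) (num : Int) : List Int :=
  if _h : winner ≤ num then
    match rh with
    | x :: rt => pvAwardLoop rt ah (PySem.List.pySetD answer x.2.1 winner) (winner + 1) num
    | [] =>
      match ah with
      | y :: at_ => pvAwardLoop [] at_ (PySem.List.pySetD answer y.2.1 winner) (winner + 1) num
      | [] => answer
  else answer
termination_by (num + 1 - winner).toNat
decreasing_by all_goals omega

def solution (region : Int) (num : Int) (info : List (List Int)) : List Int :=
  let answer := (PySem.List.pyRange 0 (info.length : Int) 1).map (fun _ => (-1 : Int))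
  let num' := min num (info.length : Int)
  -- for i in range(len(info)): new_info.append([i, info[i][0], …])  — i runs over the
  -- positions of info and info[i] is the i-th row, so this is a fold over enumerate(info)
  let new_info := (PySem.List.enumerate info 0).foldl
    (fun acc p => acc ++ [pvEntry p]) []
  -- for i in range(len(new_info)): push (-score, entry) onto one of the two heaps
  let heaps := new_info.foldl
    (fun (hs : List (Int × (Int × Int × Int)) × List (Int × (Int × Int × Int))) e =>
      if e.2.1 == region then (pvHeapPush hs.1 (-e.2.2, e), hs.2)
      else (hs.1, pvHeapPush hs.2 (-e.2.2, e)))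
    ([], [])
  pvAwardLoop heaps.1 heaps.2 answer 1 num'

-- ===== PORT B =====

def solution_alt (region : Int) (num : Int) (info : List (List Int)) : List Int :=
  -- [(i, row[0], (row[1]+1)*2 + (row[2]+2) + (row[3]+1)*5) for i, row in enumerate(info)]
  let scored := (PySem.List.enumerate info 0).map (fun p =>
    (p.1, PySem.List.pyGetD p.2 0 0,
      (PySem.List.pyGetD p.2 1 0 + 1) * 2 + (PySem.List.pyGetD p.2 2 0 + 2)
        + (PySem.List.pyGetD p.2 3 0 + 1) * 5))
  let local_ := PySem.List.sorted2 (scored.filter (fun e => e.2.1 == region))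
    (fun e => -e.2.2) (fun e => e.1)
  let others := PySem.List.sorted2 (scored.filter (fun e => !(e.2.1 == region)))
    (fun e => -e.2.2) (fun e => e.1)
  let answer := PySem.List.pyRepeat [(-1 : Int)] (info.length : Int)
  let k := max 0 (min num (info.length : Int))
  (PySem.List.enumerate (PySem.List.slice (local_ ++ others) none (some k)) 1).foldl
    (fun ans p => PySem.List.pySetD ans p.2.1 p.1) answer

-- ===== PRECONDITION & SPEC =====
-- Pre_ excludes exactly the inputs on which A raises IndexError (and B raises it too):
-- some row of info has fewer than 4 entries, so info[i][1..3] is out of range.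
def Pre_solution (region : Int) (num : Int) (info : List (List Int)) : Prop :=
  ∀ row ∈ info, 4 ≤ row.length
instance (region : Int) (num : Int) (info : List (List Int)) : Decidable (Pre_solution region num info) := by unfold Pre_solution; infer_instance

def pvWitness_solution : Int × Int × List (List Int) :=
  (1, 2, [[1, 0, 0, 0], [2, 1, 1, 1], [1, 1, 1, 1]])

def Spec_solution (region : Int) (num : Int) (info : List (List Int)) (out : List Int) : Prop := out = solution_alt region num info
instance (region : Int) (num : Int) (info : List (List Int)) (out : List Int) : Decidable (Spec_solution region num info out) := by unfold Spec_solution; infer_instance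

-- ===== CLAIM (what is proved, stated in full; the proofs are below) =====
def Claim_equal_solution : Prop := ∀ (region : Int) (num : Int) (info : List (List Int)), Dom_solution region num info → Pre_solution region num info → Spec_solution region num info (solution region num info)

-- ===== LEMMAS AND PROOFS =====

-- the comparison PySem.List.sorted2 uses for the key (-score, index)
def pvLt2 (e f : Int × Int × Int) : Bool :=
  decide (-e.2.2 < -f.2.2) || (!decide (-f.2.2 < -e.2.2) && decide (e.1 < f.1))

lemma pvBefore_map (e f : Int × Int × Int) :
    pvHeapBefore (-e.2.2, e) (-f.2.2, f) = pvLt2 e f := by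
  simp only [pvHeapBefore, pvLt2]
  by_cases h1 : (-e.2.2 : Int) < -f.2.2 <;> by_cases h2 : (-f.2.2 : Int) < -e.2.2 <;>
    simp [h1, h2] <;> omega

lemma pvInsertBy_map (x : Int × Int × Int) (acc : List (Int × Int × Int)) :
    PySem.List.insertBy pvHeapBefore (-x.2.2, x) (acc.map (fun e => (-e.2.2, e)))
      = (PySem.List.insertBy pvLt2 x acc).map (fun e => (-e.2.2, e)) := by
  induction acc with
  | nil => simp [PySem.List.insertBy]
  | cons y ys ih =>
    simp only [List.map_cons, PySem.List.insertBy, pvBefore_map x y]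
    split <;> simp [ih]

lemma pvHeapFold_map (xs : List (Int × Int × Int)) (acc : List (Int × Int × Int)) :
    xs.foldl (fun h e => pvHeapPush h (-e.2.2, e)) (acc.map (fun e => (-e.2.2, e)))
      = (xs.foldl (fun a x => PySem.List.insertBy pvLt2 x a) acc).map (fun e => (-e.2.2, e)) := by
  induction xs generalizing acc with
  | nil => rfl
  | cons x t ih =>
    simp only [List.foldl_cons, pvHeapPush, pvInsertBy_map x acc]
    exact ih _

lemma pvSorted2_eq (xs : List (Int × Int × Int)) :
    PySem.List.sorted2 xs (fun e => -e.2.2) (fun e => e.1)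
      = xs.foldl (fun a x => PySem.List.insertBy pvLt2 x a) [] := rfl

lemma pvHeapFold_nil (xs : List (Int × Int × Int)) :
    xs.foldl (fun h e => pvHeapPush h (-e.2.2, e)) []
      = (PySem.List.sorted2 xs (fun e => -e.2.2) (fun e => e.1)).map (fun e => (-e.2.2, e)) := by
  rw [pvSorted2_eq, ← pvHeapFold_map]; rfl

lemma pvDispatch (region : Int) (xs : List (Int × Int × Int))
    (rh ah : List (Int × (Int × Int × Int))) :
    xs.foldl (fun (hs : List (Int × (Int × Int × Int)) × List (Int × (Int × Int × Int))) e =>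
        if e.2.1 == region then (pvHeapPush hs.1 (-e.2.2, e), hs.2)
        else (hs.1, pvHeapPush hs.2 (-e.2.2, e))) (rh, ah)
      = ((xs.filter (fun e => e.2.1 == region)).foldl (fun h e => pvHeapPush h (-e.2.2, e)) rh,
         (xs.filter (fun e => !(e.2.1 == region))).foldl (fun h e => pvHeapPush h (-e.2.2, e)) ah) := by
  induction xs generalizing rh ah with
  | nil => rfl
  | cons x t ih =>
    by_cases h : x.2.1 = region
    · have hc : (x.2.1 == region) = true := by simp [h]
      rw [List.foldl_cons, List.filter_cons, List.filter_cons]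
      simp only [hc, if_true, Bool.not_true, Bool.false_eq_true, if_false]
      exact ih _ _
    · have hc : (x.2.1 == region) = false := by simp [h]
      rw [List.foldl_cons, List.filter_cons, List.filter_cons]
      simp only [hc, Bool.false_eq_true, if_false, Bool.not_false, if_true, List.foldl_cons]
      exact ih _ _

lemma pvAwardLoop_eq (rh ah : List (Int × (Int × Int × Int))) (answer : List Int)
    (winner num : Int) :
    pvAwardLoop rh ah answer winner num
      = (PySem.List.enumerate (((rh ++ ah).take (num + 1 - winner).toNat).map (·.2)) winner).foldl
          (fun ans p => PySem.List.pySetD ans p.2.1 p.1) answer := by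
  fun_induction pvAwardLoop rh ah answer winner num with
  | case1 ah answer winner h x rt ih =>
    have hk : (num + 1 - winner).toNat = (num + 1 - (winner + 1)).toNat + 1 := by omega
    rw [hk]
    simp only [List.cons_append, List.take_succ_cons, List.map_cons, PySem.List.enumerate_cons,
      List.foldl_cons]
    exact ih
  | case2 answer winner h y at_ ih =>
    have hk : (num + 1 - winner).toNat = (num + 1 - (winner + 1)).toNat + 1 := by omega
    rw [hk]
    simp only [List.nil_append, List.take_succ_cons, List.map_cons, PySem.List.enumerate_cons,
      List.foldl_cons]
    exact ih
  | case3 answer winner h =>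
    simp [PySem.List.enumerate_nil]
  | case4 rh ah answer winner h =>
    have hk : (num + 1 - winner).toNat = 0 := by omega
    simp [hk, PySem.List.enumerate_nil]

lemma pvScore_eq : (fun (p : Int × List Int) =>
    ((p.1, PySem.List.pyGetD p.2 0 0,
      (PySem.List.pyGetD p.2 1 0 + 1) * 2 + (PySem.List.pyGetD p.2 2 0 + 2)
        + (PySem.List.pyGetD p.2 3 0 + 1) * 5) : Int × Int × Int)) = pvEntry := rfl

lemma pvAnswer0_eq (n : Int) :
    (PySem.List.pyRange 0 n 1).map (fun _ => (-1 : Int)) = PySem.List.pyRepeat [(-1 : Int)] n := by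
  rw [PySem.List.pyRange_one, PySem.List.pyRepeat_singleton]
  simp only [List.map_map]
  rw [show ((fun (_ : Int) => (-1 : Int)) ∘ fun (k : Nat) => ((0 : Int) + (k : Int))) = (fun _ => (-1 : Int)) from rfl]
  rw [List.map_const', List.length_range]
  congr 1
  omega

lemma solution_eq (region num : Int) (info : List (List Int)) :
    solution region num info = solution_alt region num info := by
  simp only [solution, solution_alt, pvScore_eq]
  rw [PySem.List.foldl_append_singleton_eq_map, List.nil_append]
  rw [pvDispatch region _ [] []]
  dsimp only
  rw [pvHeapFold_nil, pvHeapFold_nil]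
  rw [pvAwardLoop_eq, pvAnswer0_eq]
  congr 1
  rw [PySem.List.slice_to (b := max 0 (min num (info.length : Int))) _ (by omega)]
  rw [← List.map_append]
  have ht : (min num (info.length : Int) + 1 - 1).toNat
      = (max 0 (min num (info.length : Int))).toNat := by omega
  rw [ht, ← List.map_take, List.map_map]
  have : ((fun (x : Int × (Int × Int × Int)) => x.2) ∘ (fun e => (-e.2.2, e))) = id := rfl
  rw [this, List.map_id]

-- ===== VERDICT (by name: the statement is the Claim_ definition above) =====
theorem solution_spec : Claim_equal_solution := by
  intro region num info _ _
  unfold Spec_solution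
  exact solution_eq region num info
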